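-- pv_equiv track=rewrite | github.com/islamelgendy/Replication-package-stubborn-mutants | scripts/utils/Diversity_selection.py | getMaxNotInP
-- ===== SOURCE A (Python) =====
-- def getMaxNotInP(record:dict, listP:list):
--     maxKey = ''
--     maxV = -1
--
--     for key in record.keys():
--         curValue = record[key]
--         if float(curValue) > maxV and not key in listP:
--             maxV = float(curValue)
--             maxKey = key
--
--     return maxKey
-- ===== SOURCE B (Python) =====
-- def getMaxNotInP(record: dict, listP: list):
--     # Stage 1: value table (float() evaluated on every value, like A).
--     vals = {k: float(record[k]) for k in record}
--     # Stage 2: stable descending sort by value, then return the first eligible key.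
--     for key in sorted(vals, key=lambda k: vals[k], reverse=True):
--         if vals[key] > -1 and key not in listP:
--             return key
--     return ''
-- ===== Notes on version B (the rewrite author's own statement) =====
-- stated objective: alternative
-- what changed: Replaces A's single-pass running-max accumulator by a staged sort-then-scan: build the value table, stable-sort the keys by value in descending order, and return the first key in that order with value > -1 and not in listP (stability makes ties resolve to the earliest key, exactly A's strict '>' accumulator).
import Mathlib
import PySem

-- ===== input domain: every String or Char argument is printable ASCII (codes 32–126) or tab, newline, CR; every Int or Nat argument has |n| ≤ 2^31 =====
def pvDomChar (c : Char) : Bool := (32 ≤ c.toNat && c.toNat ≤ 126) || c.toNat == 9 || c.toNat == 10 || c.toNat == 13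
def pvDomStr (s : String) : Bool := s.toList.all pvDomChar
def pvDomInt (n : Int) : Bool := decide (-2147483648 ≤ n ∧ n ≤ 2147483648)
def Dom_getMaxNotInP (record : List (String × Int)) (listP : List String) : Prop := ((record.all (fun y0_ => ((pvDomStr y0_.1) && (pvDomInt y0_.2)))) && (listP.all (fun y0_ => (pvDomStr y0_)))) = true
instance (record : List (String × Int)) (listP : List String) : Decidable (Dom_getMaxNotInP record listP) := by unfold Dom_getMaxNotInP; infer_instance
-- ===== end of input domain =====

-- B replaces A's single-pass running-max accumulator by a different algorithm:
-- build the value table, stable-sort the keys by value in descending order, and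
-- return the FIRST eligible key (value > -1 and not in listP) of that order
-- ('alternative' decomposition; same return value — float() on these ints is exact).

-- ===== PORT A =====
-- for key in record.keys(): curValue = record[key]; if float(curValue) > maxV and not key in listP: update
def getMaxNotInP (record : List (String × Int)) (listP : List String) : String :=
  let d := PySem.Dict.ofList record
  (d.keys.foldl
    (fun (acc : String × Int) key =>
      let curValue := d.getD key 0
      if curValue > acc.2 ∧ key ∉ listP then (key, curValue) else acc)
    ("", -1)).1

-- ===== PORT B =====
-- vals = {k: float(record[k]) for k in record}  (= the record dict itself: float exact on ints);
-- then scan sorted(vals, key=vals[k], reverse=True) for the first eligible key, else ''.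
def getMaxNotInP_alt (record : List (String × Int)) (listP : List String) : String :=
  let vals := PySem.Dict.ofList record
  match (PySem.List.sorted vals.keys (fun k => vals.getD k 0) true).find?
      (fun key => decide (vals.getD key 0 > -1) && decide (key ∉ listP)) with
  | some key => key
  | none => ""

-- ===== PRECONDITION & SPEC =====
def Spec_getMaxNotInP (record : List (String × Int)) (listP : List String) (out : String) : Prop := out = getMaxNotInP_alt record listP
instance (record : List (String × Int)) (listP : List String) (out : String) : Decidable (Spec_getMaxNotInP record listP out) := by unfold Spec_getMaxNotInP; infer_instance

-- ===== CLAIM (what is proved, stated in full; the proofs are below) =====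
def Claim_equal_getMaxNotInP : Prop := ∀ (record : List (String × Int)) (listP : List String), Dom_getMaxNotInP record listP → Spec_getMaxNotInP record listP (getMaxNotInP record listP)

-- ===== LEMMAS AND PROOFS =====

-- the descending-insert predicate of sorted … true, for a value function v
def pvBf (v : String → Int) (a b : String) : Bool := decide (v b < v a)
-- first-max step (A's accumulator restricted to keys)
def pvKStep (v : String → Int) (m k : String) : String := if v m < v k then k else m
-- head?-level step of the insertion sort
def pvHStep (v : String → Int) (o : Option String) (x : String) : Option String :=
  some (match o with | none => x | some y => if v y < v x then x else y)
-- the ≥-by-value relation the sort accumulator satisfies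
def pvGe (v : String → Int) (a b : String) : Prop := v b ≤ v a

lemma pvInsertPair (v : String → Int) (x : String) (ys : List String)
    (h : ys.Pairwise (pvGe v)) : (PySem.List.insertBy (pvBf v) x ys).Pairwise (pvGe v) := by
  induction ys with
  | nil => simp [PySem.List.insertBy, pvGe]
  | cons y ys ih =>
    rcases List.pairwise_cons.mp h with ⟨hy, ht⟩
    by_cases hb : pvBf v x y = true
    · have hxy : v y < v x := by simpa [pvBf] using hb
      simp only [PySem.List.insertBy, hb, if_pos]
      refine List.pairwise_cons.mpr ⟨?_, h⟩
      intro z hz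
      rcases List.mem_cons.mp hz with rfl | hz
      · exact le_of_lt hxy
      · exact le_trans (hy z hz) (le_of_lt hxy)
    · simp only [PySem.List.insertBy, hb]
      refine List.pairwise_cons.mpr ⟨?_, ih ht⟩
      intro z hz
      rcases (PySem.List.mem_insertBy (pvBf v) x z ys).mp hz with hzx | hzy
      · subst hzx; simpa [pvBf, pvGe] using hb
      · exact hy z hzy

lemma pvFilterIns (v : String → Int) (p : String → Bool) (x : String) (ys : List String)
    (h : ys.Pairwise (pvGe v)) :
    (PySem.List.insertBy (pvBf v) x ys).filter p =
      if p x then PySem.List.insertBy (pvBf v) x (ys.filter p) else ys.filter p := by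
  induction ys with
  | nil =>
    by_cases hp : p x <;> simp [PySem.List.insertBy, hp]
  | cons y ys ih =>
    rcases List.pairwise_cons.mp h with ⟨hy, ht⟩
    by_cases hb : pvBf v x y = true
    · have hxy : v y < v x := by simpa [pvBf] using hb
      simp only [PySem.List.insertBy, hb, if_pos]
      by_cases hp : p x
      · -- x stays; it still goes to the very front of the filtered list
        have hfront : ∀ zs : List String, (∀ z ∈ zs, v z ≤ v y) →
            PySem.List.insertBy (pvBf v) x zs = x :: zs := by
          intro zs hzs
          cases zs with
          | nil => rfl
          | cons z t =>
            have : pvBf v x z = true := by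
              have := hzs z List.mem_cons_self
              simp [pvBf]; omega
            simp [PySem.List.insertBy, this]
        rw [List.filter_cons, if_pos hp, if_pos hp]
        rw [hfront ((y :: ys).filter p) ?_]
        · intro z hz
          rcases List.mem_filter.mp hz with ⟨hz, _⟩
          rcases List.mem_cons.mp hz with rfl | hz
          · exact le_refl _
          · exact hy z hz
      · rw [List.filter_cons, if_neg hp, if_neg hp]
    · have hins : PySem.List.insertBy (pvBf v) x (y :: ys) =
          y :: PySem.List.insertBy (pvBf v) x ys := by
        simp [PySem.List.insertBy, hb]
      rw [hins]
      by_cases hpy : p y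
      · have hyins : PySem.List.insertBy (pvBf v) x (y :: ys.filter p) =
            y :: PySem.List.insertBy (pvBf v) x (ys.filter p) := by
          simp [PySem.List.insertBy, hb]
        rw [List.filter_cons, if_pos hpy, List.filter_cons, if_pos hpy, ih ht, hyins]
        by_cases hp : p x
        · rw [if_pos hp, if_pos hp]
        · rw [if_neg hp, if_neg hp]
      · rw [List.filter_cons, if_neg hpy, List.filter_cons, if_neg hpy, ih ht]

-- filter commutes with the stable descending sort
lemma pvSortFilterAux (v : String → Int) (p : String → Bool) (xs : List String) :
    ∀ acc : List String, acc.Pairwise (pvGe v) →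
    (xs.foldl (fun acc x => PySem.List.insertBy (pvBf v) x acc) acc).filter p =
      (xs.filter p).foldl (fun acc x => PySem.List.insertBy (pvBf v) x acc) (acc.filter p) := by
  induction xs with
  | nil => intro acc _; rfl
  | cons x xs ih =>
    intro acc hacc
    simp only [List.foldl_cons, List.filter_cons]
    rw [ih _ (pvInsertPair v x acc hacc), pvFilterIns v p x acc hacc]
    by_cases hp : p x <;> simp [hp]

lemma pvSortFilter (v : String → Int) (p : String → Bool) (xs : List String) :
    (PySem.List.sorted xs v true).filter p = PySem.List.sorted (xs.filter p) v true := by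
  rw [PySem.List.sorted_rev_eq_foldl_insertBy, PySem.List.sorted_rev_eq_foldl_insertBy]
  have h := pvSortFilterAux v p xs [] (by simp)
  simpa [pvBf] using h

-- head? of the insertion-sort fold is the running first-max fold
lemma pvHeadIns (v : String → Int) (x : String) (ys : List String) :
    (PySem.List.insertBy (pvBf v) x ys).head? = pvHStep v ys.head? x := by
  cases ys with
  | nil => rfl
  | cons y t =>
    by_cases hb : pvBf v x y = true
    · have : v y < v x := by simpa [pvBf] using hb
      simp [PySem.List.insertBy, hb, pvHStep, this]
    · have : ¬ v y < v x := by simpa [pvBf] using hb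
      simp [PySem.List.insertBy, hb, pvHStep, this]

lemma pvHeadFoldAux (v : String → Int) (xs : List String) :
    ∀ acc : List String,
    (xs.foldl (fun acc x => PySem.List.insertBy (pvBf v) x acc) acc).head? =
      xs.foldl (pvHStep v) acc.head? := by
  induction xs with
  | nil => intro acc; rfl
  | cons x xs ih =>
    intro acc
    simp only [List.foldl_cons]
    rw [ih, pvHeadIns]

lemma pvHFoldSome (v : String → Int) (cs : List String) (c : String) :
    cs.foldl (pvHStep v) (some c) = some (cs.foldl (pvKStep v) c) := by
  induction cs generalizing c with
  | nil => rfl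
  | cons x cs ih =>
    simp only [List.foldl_cons, pvHStep, pvKStep]
    split <;> exact ih _

lemma pvHeadSorted (v : String → Int) (c : String) (cs : List String) :
    (PySem.List.sorted (c :: cs) v true).head? = some (cs.foldl (pvKStep v) c) := by
  rw [PySem.List.sorted_rev_eq_foldl_insertBy]
  have h := pvHeadFoldAux v (c :: cs) []
  simp only [List.foldl_cons] at h
  simpa [pvBf, PySem.List.insertBy, pvHStep, pvHFoldSome] using h

-- find? is head? of filter
lemma pvFindHead (p : String → Bool) (l : List String) :
    l.find? p = (l.filter p).head? := by
  induction l with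
  | nil => rfl
  | cons x l ih =>
    by_cases hp : p x = true
    · rw [List.find?_cons_of_pos hp, List.filter_cons_of_pos hp]
      rfl
    · rw [List.find?_cons_of_neg hp, List.filter_cons_of_neg hp]
      exact ih

-- A's fold over all keys = first-max fold over the eligible keys
lemma pvAStepFilter (v : String → Int) (listP : List String) (ks : List String) :
    ∀ acc : String × Int, -1 ≤ acc.2 →
    ks.foldl (fun acc key => if v key > acc.2 ∧ key ∉ listP then (key, v key) else acc) acc =
      (ks.filter (fun key => decide (v key > -1) && decide (key ∉ listP))).foldl
        (fun m k => if m.2 < v k then (k, v k) else m) acc := by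
  induction ks with
  | nil => intro acc _; rfl
  | cons k ks ih =>
    intro acc hacc
    by_cases hc : (decide (v k > -1) && decide (k ∉ listP)) = true
    · rw [List.filter_cons, if_pos hc]
      simp only [Bool.and_eq_true, decide_eq_true_eq] at hc
      simp only [List.foldl_cons]
      by_cases hgt : v k > acc.2
      · rw [if_pos ⟨hgt, hc.2⟩, if_pos hgt]
        exact ih _ (le_of_lt hc.1)
      · rw [if_neg (fun h => hgt h.1), if_neg hgt]
        exact ih _ hacc
    · rw [List.filter_cons, if_neg hc]
      simp only [Bool.and_eq_true, decide_eq_true_eq] at hc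
      push Not at hc
      simp only [List.foldl_cons]
      have hno : ¬ (v k > acc.2 ∧ k ∉ listP) := by
        rintro ⟨hg, hnp⟩
        exact hnp (hc (by omega))
      rw [if_neg hno]
      exact ih _ hacc

lemma pvPairFold (v : String → Int) (cs : List String) (a : String) :
    cs.foldl (fun m k => if m.2 < v k then (k, v k) else m) (a, v a) =
      (cs.foldl (pvKStep v) a, v (cs.foldl (pvKStep v) a)) := by
  induction cs generalizing a with
  | nil => rfl
  | cons x cs ih =>
    simp only [List.foldl_cons, pvKStep]
    split <;> exact ih _

-- ===== VERDICT (by name: the statement is the Claim_ definition above) =====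
theorem getMaxNotInP_spec : Claim_equal_getMaxNotInP := by
  intro record listP _
  unfold Spec_getMaxNotInP getMaxNotInP getMaxNotInP_alt
  set d := PySem.Dict.ofList record with hd
  set v : String → Int := fun k => d.getD k 0 with hv
  set p : String → Bool := fun key => decide (v key > -1) && decide (key ∉ listP) with hp
  simp only
  rw [pvFindHead, pvSortFilter]
  rw [pvAStepFilter v listP d.keys ("", -1) (by norm_num)]
  cases hcs : d.keys.filter p with
  | nil => simp [PySem.List.sorted]
  | cons c cs =>
    have hc : p c = true := List.of_mem_filter (by rw [hcs]; exact List.mem_cons_self)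
    have hvc : -1 < v c := by
      simp only [hp, Bool.and_eq_true, decide_eq_true_eq] at hc
      exact hc.1
    rw [pvHeadSorted]
    simp only [List.foldl_cons]
    rw [if_pos (show ((("" : String), (-1 : Int))).2 < v c from hvc)]
    rw [pvPairFold]
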